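-- pv_equiv track=rewrite | github.com/xuebinsu/gpdb | gpMgmt/sbin/gpconfig_offline.py | parse_host_and_data_dir
-- ===== SOURCE A (Python) =====
-- def parse_host_and_data_dir(line: str):
--     _, message = line.split(":-")
--     host, data_dir = None, None
--     for attr in message.split(" "):
--         if "=" not in message:
--             continue
--         k, v = attr.strip().split("=")
--         if k == "host":
--             host = v
--         if k == "dir":
--             data_dir = v
--     return host, data_dir
-- ===== SOURCE B (Python) =====
-- def parse_host_and_data_dir(line: str):
--     _, message = line.split(":-")
--     if "=" not in message:
--         return None, None
--     pairs = [attr.strip().split("=") for attr in message.split(" ")]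
--     host = next((v for k, v in reversed(pairs) if k == "host"), None)
--     data_dir = next((v for k, v in reversed(pairs) if k == "dir"), None)
--     return host, data_dir
-- ===== Notes on version B (the rewrite author's own statement) =====
-- stated objective: alternative
-- what changed: B replaces A's single forward loop with two scalar accumulators by staged passes: it parses the message once into a list of (key,value) pairs, then answers the 'host' and 'dir' queries by two separate backward scans that return the first match in reverse (last-wins by construction), with the loop-invariant '=' guard hoisted to an early return.
import Mathlib
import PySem

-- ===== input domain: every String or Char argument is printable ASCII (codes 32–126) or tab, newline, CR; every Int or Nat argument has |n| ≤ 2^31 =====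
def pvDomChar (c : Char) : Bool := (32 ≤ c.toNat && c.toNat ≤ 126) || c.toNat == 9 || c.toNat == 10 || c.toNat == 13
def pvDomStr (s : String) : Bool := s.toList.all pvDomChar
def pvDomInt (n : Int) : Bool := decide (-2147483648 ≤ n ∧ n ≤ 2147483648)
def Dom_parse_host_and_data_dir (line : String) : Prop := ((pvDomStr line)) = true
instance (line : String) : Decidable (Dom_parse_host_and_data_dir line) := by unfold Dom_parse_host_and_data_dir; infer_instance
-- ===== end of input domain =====

-- B parses the message into a list of (key,value) tokens once and then answers each of the two
-- queries by a separate backward scan (last-wins becomes first-match-in-reverse), instead of A's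
-- single forward loop updating two scalar accumulators (objective: alternative).


-- ===== PORT A =====
-- one loop step of A: the per-iteration '=' guard, then 'k, v = attr.strip().split("=")'
-- (Python raises on a token that does not split into exactly two pieces; Pre_ excludes that,
-- the '_ => st' arm is a dummy outside Pre_)
def pvStepA (message : String) (st : Option String × Option String) (attr : String) :
    Option String × Option String :=
  if PySem.Str.isIn "=" message then
    match (PySem.Str.split? (PySem.Str.strip attr) "=").getD [] with
    | [k, v] => ((if k = "host" then some v else st.1), (if k = "dir" then some v else st.2))
    | _ => st
  else st

def parse_host_and_data_dir (line : String) : Option String × Option String :=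
  match (PySem.Str.split? line ":-").getD [] with
  | [_, message] =>
      ((PySem.Str.split? message " ").getD []).foldl (pvStepA message) (none, none)
  | _ => (none, none)  -- Python raises on unpack; excluded by Pre_

-- ===== PORT B =====
-- 'next((v for k, v in reversed(pairs) if k == key), None)': first match scanning the parsed
-- pairs back to front (the '_ => none' arm is a dummy: a malformed pair makes Python's
-- unpacking raise, excluded by Pre_)
def pvLastVal (key : String) (pairs : List (List String)) : Option String :=
  pairs.reverse.findSome? fun p =>
    match p with
    | [k, v] => if k = key then some v else none
    | _ => none

def parse_host_and_data_dir_alt (line : String) : Option String × Option String :=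
  match (PySem.Str.split? line ":-").getD [] with
  | [_, message] =>
      if PySem.Str.isIn "=" message then
        let pairs := ((PySem.Str.split? message " ").getD []).map
          (fun attr => (PySem.Str.split? (PySem.Str.strip attr) "=").getD [])
        (pvLastVal "host" pairs, pvLastVal "dir" pairs)
      else (none, none)
  | _ => (none, none)  -- Python raises on unpack; excluded by Pre_

-- ===== PRECONDITION & SPEC =====
-- Exactly the inputs on which A returns: the line has exactly one ':-' (the unpacking succeeds)
-- and, if the message contains '=', every space-separated token strips/splits into exactly k=v
-- (otherwise Python's unpacking raises ValueError).
def Pre_parse_host_and_data_dir (line : String) : Prop :=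
  ((PySem.Str.split? line ":-").getD []).length = 2 ∧
  (∀ message ∈ ((PySem.Str.split? line ":-").getD []).drop 1,
    PySem.Str.isIn "=" message = true →
      ∀ attr ∈ (PySem.Str.split? message " ").getD [],
        ((PySem.Str.split? (PySem.Str.strip attr) "=").getD []).length = 2)
instance (line : String) : Decidable (Pre_parse_host_and_data_dir line) := by
  unfold Pre_parse_host_and_data_dir; infer_instance

def pvWitness_parse_host_and_data_dir : String := "20230101 INFO:-host=sdw1 dir=/data1 port=5432"

def Spec_parse_host_and_data_dir (line : String) (out : Option String × Option String) : Prop := out = parse_host_and_data_dir_alt line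
instance (line : String) (out : Option String × Option String) : Decidable (Spec_parse_host_and_data_dir line out) := by unfold Spec_parse_host_and_data_dir; infer_instance

-- ===== CLAIM (what is proved, stated in full; the proofs are below) =====
def Claim_equal_parse_host_and_data_dir : Prop := ∀ (line : String), Dom_parse_host_and_data_dir line → Pre_parse_host_and_data_dir line → Spec_parse_host_and_data_dir line (parse_host_and_data_dir line)

-- ===== LEMMAS AND PROOFS =====

-- with no '=' in the message, A's loop body is a no-op on every iteration
theorem foldlA_of_not_isIn (message : String) (h : PySem.Str.isIn "=" message = false)
    (ts : List String) (st : Option String × Option String) :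
    ts.foldl (pvStepA message) st = st := by
  induction ts generalizing st with
  | nil => rfl
  | cons t ts ih =>
    have h' : PySem.Chars.isIn ['='] message.toList = false := by simpa using h
    simp [List.foldl, pvStepA, h', ih]

-- peeling one pair off the front of the reverse-scan: the rest overrides it (last wins)
theorem pvLastVal_cons (key : String) (p : List String) (ps : List (List String)) :
    pvLastVal key (p :: ps) =
      (pvLastVal key ps).or
        (match p with | [k, v] => if k = key then some v else none | _ => none) := by
  unfold pvLastVal
  rw [List.reverse_cons, List.findSome?_append]
  cases ps.reverse.findSome? _ <;> simp only [List.findSome?] <;>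
    (generalize (match p with
      | [k, v] => if k = key then some v else none
      | _ => none) = m) <;> cases m <;> rfl

-- loop invariant: A's scalar pair after the loop = B's two reverse searches overriding the
-- initial state
theorem foldl_inv (message : String) (h : PySem.Str.isIn "=" message = true)
    (ts : List String)
    (hts : ∀ attr ∈ ts, ((PySem.Str.split? (PySem.Str.strip attr) "=").getD []).length = 2)
    (st : Option String × Option String) :
    ts.foldl (pvStepA message) st =
      ((pvLastVal "host" (ts.map (fun attr => (PySem.Str.split? (PySem.Str.strip attr) "=").getD []))).or st.1,
       (pvLastVal "dir" (ts.map (fun attr => (PySem.Str.split? (PySem.Str.strip attr) "=").getD []))).or st.2) := by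
  induction ts generalizing st with
  | nil => simp [pvLastVal]
  | cons t ts ih =>
    have ht := hts t (by simp)
    obtain ⟨k, v, hkv⟩ : ∃ k v, (PySem.Str.split? (PySem.Str.strip t) "=").getD [] = [k, v] := by
      rcases e : (PySem.Str.split? (PySem.Str.strip t) "=").getD [] with _ | ⟨a, _ | ⟨b, _ | _⟩⟩ <;>
        simp_all
    have hstep : pvStepA message st t =
        ((if k = "host" then some v else none).or st.1,
         (if k = "dir" then some v else none).or st.2) := by
      simp only [pvStepA, h, if_true, hkv]
      by_cases h1 : k = "host" <;> by_cases h2 : k = "dir" <;> simp [h1, h2]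
    simp only [List.foldl, List.map, hstep]
    rw [ih (fun a ha => hts a (by simp [ha])) _]
    simp only [pvLastVal_cons, hkv, Option.or_assoc]

-- ===== VERDICT (by name: the statement is the Claim_ definition above) =====
theorem parse_host_and_data_dir_spec : Claim_equal_parse_host_and_data_dir := by
  intro line _ hpre
  obtain ⟨hlen, hmsg⟩ := hpre
  unfold Spec_parse_host_and_data_dir parse_host_and_data_dir parse_host_and_data_dir_alt
  rcases e : (PySem.Str.split? line ":-").getD [] with _ | ⟨a, _ | ⟨message, _ | _⟩⟩ <;>
    rw [e] at hlen <;> simp at hlen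
  rw [e] at hmsg
  have hm := hmsg message (by simp)
  by_cases h : PySem.Str.isIn "=" message = true
  · simp only [h, if_true]
    rw [foldl_inv message h _ (hm h) (none, none)]
    simp
  · rw [Bool.not_eq_true] at h
    dsimp only
    rw [foldlA_of_not_isIn message h, h]
    simp
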